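-- pv_equiv track=rewrite | github.com/HodzaArmen/P1 | ZemljevidOvir/ZemljevidOvir.py | pretvori_zemljevid
-- ===== SOURCE A (Python) =====
-- def pretvori_vrstico(vrstica):
--     ovire = []
--     trenutnaOvira = None
--     index = 1
--     for znak in vrstica:
--         if znak == "#":
--             if trenutnaOvira is None:
--                 trenutnaOvira = (index, index)
--             else:
--                 trenutnaOvira = (trenutnaOvira[0], index)
--         else:
--             if trenutnaOvira is not None:
--                 ovire.append(trenutnaOvira)
--                 trenutnaOvira = None
--         index += 1
--     if trenutnaOvira is not None:
--         ovire.append(trenutnaOvira)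
--     return ovire
--
-- def pretvori_zemljevid(vrstice):
--     ovire = []
--     y = 1
--     for vrstica in vrstice:
--         for x0, x1 in pretvori_vrstico(vrstica):
--             ovire.append((x0, x1, y))
--         y += 1
--     return sorted(ovire, key=lambda x: (x[2], x[0])) #sortirano po vrsticah in stolpcih
-- ===== SOURCE B (Python) =====
-- def pretvori_zemljevid(vrstice):
--     # Boundary detection: a run of '#' starts where a '#' follows a non-'#'
--     # (or line start) and ends where a '#' precedes a non-'#' (or line end).
--     # Rows are scanned top to bottom, starts left to right, so the result is
--     # already ordered by (row, column) and no sort is needed.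
--     rez = []
--     for y, v in enumerate(vrstice, 1):
--         starts = [i for i, (c, p) in enumerate(zip(v, ' ' + v), 1) if c == '#' and p != '#']
--         ends = [i for i, (c, nx) in enumerate(zip(v, v[1:] + ' '), 1) if c == '#' and nx != '#']
--         rez += [(a, b, y) for a, b in zip(starts, ends)]
--     return rez
-- ===== Notes on version B (the rewrite author's own statement) =====
-- stated objective: simpler
-- what changed: Replaced the per-character state machine (pending-run accumulator) plus final sort with boundary detection: each row is zipped with its shifted self to list run starts and run ends, which are paired by zip, and the triples are emitted directly in (row, column) order so no sort is needed.
import Mathlib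
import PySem

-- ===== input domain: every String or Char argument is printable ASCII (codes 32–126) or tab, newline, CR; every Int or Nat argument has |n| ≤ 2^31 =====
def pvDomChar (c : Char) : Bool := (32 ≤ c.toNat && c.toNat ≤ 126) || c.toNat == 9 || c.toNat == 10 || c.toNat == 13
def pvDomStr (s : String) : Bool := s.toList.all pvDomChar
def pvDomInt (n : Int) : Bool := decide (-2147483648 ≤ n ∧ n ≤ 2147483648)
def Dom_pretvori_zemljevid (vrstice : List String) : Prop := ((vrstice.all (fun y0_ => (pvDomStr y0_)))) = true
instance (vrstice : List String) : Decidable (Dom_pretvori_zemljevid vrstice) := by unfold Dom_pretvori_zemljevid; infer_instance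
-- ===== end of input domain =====

-- B replaces A's per-character state machine plus final sort with boundary detection
-- (zip each row with its shifted self to pair run starts with run ends) and emits the
-- triples directly in the already-sorted (row, column) order; objective: simpler.

-- ===== PORT A =====
def pvFinish (st : List (Int × Int) × Option (Int × Int) × Int) : List (Int × Int) :=
  match st.2.1 with
  | some t => st.1 ++ [t]
  | none => st.1

def pvStepA (st : List (Int × Int) × Option (Int × Int) × Int) (znak : Char)
    : List (Int × Int) × Option (Int × Int) × Int :=
  if znak = '#' then
    match st.2.1 with
    | none => (st.1, some (st.2.2, st.2.2), st.2.2 + 1)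
    | some t => (st.1, some (t.1, st.2.2), st.2.2 + 1)
  else
    match st.2.1 with
    | some t => (st.1 ++ [t], none, st.2.2 + 1)
    | none => (st.1, none, st.2.2 + 1)

def pretvori_vrstico (vrstica : String) : List (Int × Int) :=
  pvFinish (vrstica.toList.foldl pvStepA ([], none, 1))

def pretvori_zemljevid (vrstice : List String) : List (List Int) :=
  let st := vrstice.foldl
    (fun (st : List (List Int) × Int) vrstica =>
      ((pretvori_vrstico vrstica).foldl (fun acc p => acc ++ [[p.1, p.2, st.2]]) st.1, st.2 + 1))
    ([], 1)
  -- key=lambda x: (x[2], x[0]); every triple has length 3, so x[2]/x[0] never raise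
  PySem.List.sorted2 st.1 (fun x => PySem.List.pyGetD x 2 0) (fun x => PySem.List.pyGetD x 0 0)

-- ===== PORT B =====
def pvAltRow (v : String) (y : Int) : List (List Int) :=
  let cs := v.toList
  -- zip(v, ' ' + v) pairs each char with its predecessor (a space before the first char)
  let starts := ((PySem.List.enumerate (cs.zip (' ' :: cs)) 1).filter
      (fun q => q.2.1 == '#' && q.2.2 != '#')).map (·.1)
  -- zip(v, v[1:] + ' ') pairs each char with its successor (a space after the last char)
  let ends := ((PySem.List.enumerate (cs.zip (cs.drop 1 ++ [' '])) 1).filter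
      (fun q => q.2.1 == '#' && q.2.2 != '#')).map (·.1)
  (starts.zip ends).map (fun ab => [ab.1, ab.2, y])

def pretvori_zemljevid_alt (vrstice : List String) : List (List Int) :=
  (PySem.List.enumerate vrstice 1).foldl (fun rez yv => rez ++ pvAltRow yv.2 yv.1) []

-- ===== PRECONDITION & SPEC =====
def Spec_pretvori_zemljevid (vrstice : List String) (out : List (List Int)) : Prop := out = pretvori_zemljevid_alt vrstice
instance (vrstice : List String) (out : List (List Int)) : Decidable (Spec_pretvori_zemljevid vrstice out) := by unfold Spec_pretvori_zemljevid; infer_instance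

-- ===== CLAIM (what is proved, stated in full; the proofs are below) =====
def Claim_equal_pretvori_zemljevid : Prop := ∀ (vrstice : List String), Dom_pretvori_zemljevid vrstice → Spec_pretvori_zemljevid vrstice (pretvori_zemljevid vrstice)

-- ===== LEMMAS AND PROOFS =====

-- Recursive characterisations of B's start/end column lists
def pvS : List Char → Char → Int → List Int
  | [], _, _ => []
  | c :: cs, p, i => if c = '#' ∧ p ≠ '#' then i :: pvS cs c (i + 1) else pvS cs c (i + 1)

def pvE : List Char → Int → List Int
  | [], _ => []
  | c :: cs, i => if c = '#' ∧ cs.headD ' ' ≠ '#' then i :: pvE cs (i + 1) else pvE cs (i + 1)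

def pvPendE (cs : List Char) (i : Int) : List Int :=
  if cs.headD ' ' = '#' then pvE cs i else (i - 1) :: pvE cs i

lemma starts_eq (cs : List Char) (p : Char) (i : Int) :
    ((PySem.List.enumerate (cs.zip (p :: cs)) i).filter
      (fun q => q.2.1 == '#' && q.2.2 != '#')).map (·.1) = pvS cs p i := by
  induction cs generalizing p i with
  | nil => rfl
  | cons c cs ih =>
    simp only [List.zip_cons_cons, PySem.List.enumerate_cons, List.filter_cons]
    by_cases h1 : c = '#' <;> by_cases h2 : p = '#' <;>
      simp [pvS, h1, h2, ih]

lemma ends_eq (cs : List Char) (i : Int) :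
    ((PySem.List.enumerate (cs.zip (cs.drop 1 ++ [' '])) i).filter
      (fun q => q.2.1 == '#' && q.2.2 != '#')).map (·.1) = pvE cs i := by
  induction cs generalizing i with
  | nil => rfl
  | cons c cs ih =>
    cases cs with
    | nil => by_cases h1 : c = '#' <;> simp [pvE, h1]
    | cons d ds =>
      have hz : (c :: d :: ds).zip (List.drop 1 (c :: d :: ds) ++ [' '])
          = (c, d) :: (d :: ds).zip (List.drop 1 (d :: ds) ++ [' ']) := by simp
      have hr : pvE (c :: d :: ds) i
          = if c = '#' ∧ d ≠ '#' then i :: pvE (d :: ds) (i + 1) else pvE (d :: ds) (i + 1) := rfl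
      rw [hz]
      simp only [PySem.List.enumerate_cons, List.filter_cons]
      rw [hr]
      by_cases h1 : c = '#' <;> by_cases h2 : d = '#' <;>
      all_goals
        (have ih' := ih (i + 1)
         simp only [List.drop_succ_cons, List.drop_zero] at ih'
         try simp [h2] at ih'
         simp [h1, h2, ih'])

-- the core invariant of A's state machine, against B's start/end lists
lemma rowA (cs : List Char) : ∀ (i : Int) (acc : List (Int × Int)),
    (∀ p, p ≠ '#' → pvFinish (cs.foldl pvStepA (acc, none, i))
        = acc ++ (pvS cs p i).zip (pvE cs i))
    ∧ (∀ s, pvFinish (cs.foldl pvStepA (acc, some (s, i - 1), i))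
        = acc ++ ((s :: pvS cs '#' i).zip (pvPendE cs i))) := by
  induction cs with
  | nil =>
    intro i acc
    constructor
    · intro p hp; simp [pvFinish, pvS, pvE]
    · intro s; simp [pvFinish, pvS, pvPendE, pvE]
  | cons c cs ih =>
    intro i acc
    constructor
    · intro p hp
      by_cases h1 : c = '#'
      · have hstep : pvStepA (acc, none, i) c = (acc, some (i, i), i + 1) := by
          simp [pvStepA, h1]
        have := ((ih (i + 1) acc).2) i
        simp only [List.foldl_cons, hstep]
        have hi : (i : Int) + 1 - 1 = i := by ring
        rw [hi] at this
        rw [this]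
        subst h1
        simp [pvS, pvE, pvPendE, hp]
      · have hstep : pvStepA (acc, none, i) c = (acc, none, i + 1) := by
          simp [pvStepA, h1]
        have := ((ih (i + 1) acc).1) c h1
        simp only [List.foldl_cons, hstep]
        rw [this]
        simp [pvS, pvE, h1, hp]
    · intro s
      by_cases h1 : c = '#'
      · have hstep : pvStepA (acc, some (s, i - 1), i) c = (acc, some (s, i), i + 1) := by
          simp [pvStepA, h1]
        have := ((ih (i + 1) acc).2) s
        have hi : (i : Int) + 1 - 1 = i := by ring
        rw [hi] at this
        simp only [List.foldl_cons, hstep]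
        rw [this]
        subst h1
        simp [pvS, pvPendE, pvE]
      · have hstep : pvStepA (acc, some (s, i - 1), i) c = (acc ++ [(s, i - 1)], none, i + 1) := by
          simp [pvStepA, h1]
        have := ((ih (i + 1) (acc ++ [(s, i - 1)])).1) c h1
        simp only [List.foldl_cons, hstep]
        rw [this]
        simp [pvS, pvPendE, pvE, h1]

lemma row_eq (v : String) (y : Int) :
    (pretvori_vrstico v).map (fun p => [p.1, p.2, y]) = pvAltRow v y := by
  have hA : pretvori_vrstico v = (pvS v.toList ' ' 1).zip (pvE v.toList 1) := by
    have := ((rowA v.toList 1 []).1) ' ' (by decide)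
    simpa [pretvori_vrstico] using this
  rw [hA, pvAltRow, starts_eq, ends_eq]

-- A's outer loop, rewritten against B's per-row results
lemma outer_eq (vs : List String) : ∀ (y : Int) (acc : List (List Int)),
    (vs.foldl
      (fun (st : List (List Int) × Int) vrstica =>
        ((pretvori_vrstico vrstica).foldl (fun a p => a ++ [[p.1, p.2, st.2]]) st.1, st.2 + 1))
      (acc, y)).1
    = (PySem.List.enumerate vs y).foldl (fun rez yv => rez ++ pvAltRow yv.2 yv.1) acc := by
  induction vs with
  | nil => intro y acc; rfl
  | cons v vs ih =>
    intro y acc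
    simp only [List.foldl_cons, PySem.List.enumerate_cons]
    rw [ih (y + 1)]
    rw [PySem.List.foldl_append_singleton_eq_map, row_eq]

-- the lexicographic (row, column) order of sorted's key
def pvLex (a b : List Int) : Prop :=
  PySem.List.pyGetD a 2 0 < PySem.List.pyGetD b 2 0 ∨
    (PySem.List.pyGetD a 2 0 = PySem.List.pyGetD b 2 0 ∧
      PySem.List.pyGetD a 0 0 < PySem.List.pyGetD b 0 0)

lemma pvS_bound (cs : List Char) : ∀ (p : Char) (i : Int), ∀ x ∈ pvS cs p i, i ≤ x := by
  induction cs with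
  | nil => intro p i x hx; simp [pvS] at hx
  | cons c cs ih =>
    intro p i x hx
    by_cases h : c = '#' ∧ p ≠ '#' <;> simp [pvS, h] at hx
    · rcases hx with rfl | hx
      · omega
      · have := ih '#' (i + 1) x hx; omega
    · have := ih c (i + 1) x hx; omega

lemma pvS_pairwise (cs : List Char) : ∀ (p : Char) (i : Int), (pvS cs p i).Pairwise (· < ·) := by
  induction cs with
  | nil => intro p i; simp [pvS]
  | cons c cs ih =>
    intro p i
    by_cases h : c = '#' ∧ p ≠ '#' <;> simp [pvS, h]
    · exact ⟨fun x hx => by have := pvS_bound cs '#' (i + 1) x hx; omega, ih '#' (i + 1)⟩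
    · exact ih c (i + 1)

lemma zip_pairwise_fst {α β : Type} (r : α → α → Prop) :
    ∀ (S : List α) (E : List β), S.Pairwise r → (S.zip E).Pairwise (fun a b => r a.1 b.1) := by
  intro S
  induction S with
  | nil => intro E _; simp
  | cons s S ih =>
    intro E h
    cases E with
    | nil => simp
    | cons e E =>
      rw [List.pairwise_cons] at h
      rw [List.zip_cons_cons, List.pairwise_cons]
      exact ⟨fun q hq => h.1 q.1 (List.of_mem_zip hq).1, ih E h.2⟩

lemma pyGetD_triple2 (a b c : Int) : PySem.List.pyGetD [a, b, c] 2 0 = c := by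
  simp [PySem.List.pyGetD, PySem.List.pyGet?, PySem.List.pyIdx?]

lemma pyGetD_triple0 (a b c : Int) : PySem.List.pyGetD [a, b, c] 0 0 = a := by
  simp [PySem.List.pyGetD, PySem.List.pyGet?, PySem.List.pyIdx?]

lemma altRow_key1 (v : String) (y : Int) : ∀ t ∈ pvAltRow v y, PySem.List.pyGetD t 2 0 = y := by
  intro t ht
  rw [pvAltRow] at ht
  simp only [List.mem_map] at ht
  obtain ⟨ab, _, rfl⟩ := ht
  exact pyGetD_triple2 _ _ _

lemma altRow_pairwise (v : String) (y : Int) : (pvAltRow v y).Pairwise pvLex := by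
  rw [pvAltRow, starts_eq, ends_eq]
  apply List.Pairwise.map
  · intro a b hab
    right
    refine ⟨by rw [pyGetD_triple2, pyGetD_triple2], ?_⟩
    rw [pyGetD_triple0, pyGetD_triple0]; exact hab
  · exact zip_pairwise_fst _ _ _ (pvS_pairwise v.toList ' ' 1)

lemma alt_pairwise (vs : List String) : ∀ (y : Int) (acc : List (List Int)),
    acc.Pairwise pvLex → (∀ t ∈ acc, PySem.List.pyGetD t 2 0 < y) →
    ((PySem.List.enumerate vs y).foldl (fun rez yv => rez ++ pvAltRow yv.2 yv.1) acc).Pairwise pvLex := by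
  induction vs with
  | nil => intro y acc h _; exact h
  | cons v vs ih =>
    intro y acc h hk
    simp only [PySem.List.enumerate_cons, List.foldl_cons]
    apply ih (y + 1)
    · rw [List.pairwise_append]
      refine ⟨h, altRow_pairwise v y, ?_⟩
      intro a ha b hb
      left
      rw [altRow_key1 v y b hb]
      exact hk a ha
    · intro t ht
      rcases List.mem_append.mp ht with ht | ht
      · have := hk t ht; omega
      · rw [altRow_key1 v y t ht]; omega

lemma foldl_insertBy_eq {α : Type} (before : α → α → Bool) :
    ∀ (xs acc : List α),
    (∀ x ∈ xs, ∀ y ∈ acc, before x y = false) →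
    xs.Pairwise (fun a b => before b a = false) →
    xs.foldl (fun a x => PySem.List.insertBy before x a) acc = acc ++ xs := by
  intro xs
  induction xs with
  | nil => intro acc _ _; simp
  | cons x xs ih =>
    intro acc h1 h2
    rw [List.pairwise_cons] at h2
    rw [List.foldl_cons,
      PySem.List.insertBy_of_forall_not_before before x acc (h1 x (by simp)),
      ih (acc ++ [x]) ?_ h2.2]
    · simp
    · intro z hz w hw
      rcases List.mem_append.mp hw with hw | hw
      · exact h1 z (by simp [hz]) w hw
      · simp only [List.mem_singleton] at hw
        subst hw
        exact h2.1 z hz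

lemma sorted2_eq_self (xs : List (List Int)) (h : xs.Pairwise pvLex) :
    PySem.List.sorted2 xs (fun x => PySem.List.pyGetD x 2 0) (fun x => PySem.List.pyGetD x 0 0) = xs := by
  have : PySem.List.sorted2 xs (fun x => PySem.List.pyGetD x 2 0) (fun x => PySem.List.pyGetD x 0 0)
      = xs.foldl (fun acc x => PySem.List.insertBy
          (fun a b => decide (PySem.List.pyGetD a 2 0 < PySem.List.pyGetD b 2 0) ||
            !decide (PySem.List.pyGetD b 2 0 < PySem.List.pyGetD a 2 0) &&
              decide (PySem.List.pyGetD a 0 0 < PySem.List.pyGetD b 0 0)) x acc) [] := rfl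
  rw [this, foldl_insertBy_eq _ xs [] (by simp) ?_]
  · simp
  · refine h.imp ?_
    intro a b hab
    rcases hab with hab | ⟨hab1, hab2⟩ <;> simp <;> omega

-- ===== VERDICT (by name: the statement is the Claim_ definition above) =====
theorem pretvori_zemljevid_spec : Claim_equal_pretvori_zemljevid := by
  intro vrstice _
  show pretvori_zemljevid vrstice = pretvori_zemljevid_alt vrstice
  rw [pretvori_zemljevid]
  rw [outer_eq vrstice 1 []]
  exact sorted2_eq_self _ (alt_pairwise vrstice 1 [] (by simp) (by simp))
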